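-- pv_equiv track=rewrite | github.com/pypi-data/pypi-mirror-320 | packages/tree-interval/tree_interval-0.1.31.tar.gz/tree_interval-0.1.31/src/tree_interval/core/future.py | complete_expression
-- ===== SOURCE A (Python) =====
-- def complete_expression(expr: str) -> str:
--     """
--     Given an expression string that may have unclosed brackets
--     or quotes, append the needed closing brackets/quotes so
--     that all open brackets/quotes are closed (naively).
--     """
--     bracket_map = {'(': ')', '[': ']', '{': '}'}
--
--     stack = []
--     in_single_quote = False
--     in_double_quote = False
--
--     result_chars = []
--
--     for ch in expr:
--         result_chars.append(ch)
--
--         # Check for opening brackets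
--         if ch in bracket_map:
--             stack.append(ch)
--
--         # Check for closing brackets
--         elif ch in bracket_map.values():
--             # If it matches the top of the stack, pop
--             if stack and bracket_map.get(stack[-1], None) == ch:
--                 stack.pop()
--
--         # Toggle quotes
--         elif ch == "'":
--             in_single_quote = not in_single_quote
--         elif ch == '"':
--             in_double_quote = not in_double_quote
--
--     # Close any still-open quotes
--     if in_single_quote:
--         result_chars.append("'")
--     if in_double_quote:
--         result_chars.append('"')
--
--     # Close any unmatched brackets in LIFO order
--     while stack:
--         opening = stack.pop()
--         closing = bracket_map[opening]
--         result_chars.append(closing)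
--
--     return "".join(result_chars)
-- ===== SOURCE B (Python) =====
-- CLOSER = {'(': ')', '[': ']', '{': '}'}
--
-- def complete_expression(expr: str) -> str:
--     """Recursive-descent completion: the call stack replaces an explicit
--     bracket stack, and the needed closers are produced on the return path;
--     unclosed quotes are decided by count parity."""
--
--     def inner(i, close):
--         # Consume characters from position i while looking for `close`.
--         # Returns (j, needs): j = next unread position; needs == [] iff the
--         # matching `close` was found; otherwise the end of expr was reached
--         # and needs lists the closers owed, innermost first (ending in `close`).
--         while i < len(expr):
--             ch = expr[i]
--             i += 1
--             c = CLOSER.get(ch)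
--             if c is not None:
--                 i, needs = inner(i, c)
--                 if needs:
--                     return i, needs + [close]
--             elif ch == close:
--                 return i, []
--         return i, [close]
--
--     i, needs = 0, []
--     while i < len(expr):
--         ch = expr[i]
--         i += 1
--         c = CLOSER.get(ch)
--         if c is not None:
--             i, needs = inner(i, c)
--
--     out = expr
--     if expr.count("'") % 2:
--         out += "'"
--     if expr.count('"') % 2:
--         out += '"'
--     return out + "".join(needs)
-- ===== Notes on version B (the rewrite author's own statement) =====
-- stated objective: alternative
-- what changed: Replaces A's explicit opener stack, two quote-toggle flags and per-character result buffer by a recursive descent: each opener starts a recursive call that searches for its own closer, the needed closers are emitted on the return path (call stack instead of an explicit stack), and unclosed quotes are decided by count parity.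
import Mathlib
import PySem

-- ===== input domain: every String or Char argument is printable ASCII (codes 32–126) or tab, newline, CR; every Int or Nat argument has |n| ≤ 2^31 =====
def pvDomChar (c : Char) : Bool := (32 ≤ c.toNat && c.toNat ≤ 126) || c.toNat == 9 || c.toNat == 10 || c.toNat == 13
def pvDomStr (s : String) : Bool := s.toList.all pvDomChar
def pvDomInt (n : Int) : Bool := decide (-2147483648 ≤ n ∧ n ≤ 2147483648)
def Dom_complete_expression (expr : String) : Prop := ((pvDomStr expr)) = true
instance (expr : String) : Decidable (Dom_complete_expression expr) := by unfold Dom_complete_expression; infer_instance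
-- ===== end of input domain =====

-- B replaces A's explicit opener stack, quote-toggle flags and result buffer by a
-- recursive descent (the call stack holds the open brackets; closers are emitted on
-- the return path) with quote parity computed by counting; objective: alternative.

-- ===== PORT A =====
-- bracket_map = {'(': ')', '[': ']', '{': '}'} ported as a lookup function:
-- 'ch in bracket_map' = (bmapA ch).isSome, 'bracket_map.values()' = [')',']','}'],
-- 'bracket_map.get(x, None)' = bmapA x (exact: the dict is a fixed literal).
def bmapA (c : Char) : Option Char :=
  if c = '(' then some ')' else if c = '[' then some ']'
  else if c = '{' then some '}' else none

-- loop body of A; state = (stack, in_single_quote, in_double_quote, result_chars)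
def stepA (s : List Char × Bool × Bool × List Char) (ch : Char) :
    List Char × Bool × Bool × List Char :=
  let stack := s.1
  let res := s.2.2.2 ++ [ch]
  if (bmapA ch).isSome then (stack ++ [ch], s.2.1, s.2.2.1, res)
  else if [')', ']', '}'].contains ch then
    match stack.getLast? with
    | some t => if bmapA t = some ch then (stack.dropLast, s.2.1, s.2.2.1, res)
                else (stack, s.2.1, s.2.2.1, res)
    | none => (stack, s.2.1, s.2.2.1, res)
  else if ch = '\'' then (stack, !s.2.1, s.2.2.1, res)
  else if ch = '"' then (stack, s.2.1, !s.2.2.1, res)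
  else (stack, s.2.1, s.2.2.1, res)

-- 'while stack: opening = stack.pop(); result_chars.append(bracket_map[opening])'
-- = walk the reversed stack; bracket_map[opening] is (bmapA c).getD c (the stack only holds keys).
def drainA : List Char → List Char
  | [] => []
  | c :: rest => (bmapA c).getD c :: drainA rest

def complete_expression (expr : String) : String :=
  let s := expr.toList.foldl stepA ([], false, false, [])
  String.mk (s.2.2.2 ++ (if s.2.1 then ['\''] else [])
                     ++ (if s.2.2.1 then ['"'] else [])
                     ++ drainA s.1.reverse)

-- ===== PORT B =====
-- CLOSER.get ported as a lookup function (the dict is a fixed literal).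
def closerB (c : Char) : Option Char :=
  if c = '(' then some ')' else if c = '[' then some ']'
  else if c = '{' then some '}' else none

-- Source B's `inner(i, close)` on the suffix of expr starting at i, as a list; the fuel
-- argument is a totality guard only (never exhausted when fuel > length, see innerB_spec):
-- it performs exactly Source B's recursion. Returns (unread suffix, needed closers).
def innerB : Nat → List Char → Char → List Char × List Char
  | 0, l, _ => (l, [])
  | _ + 1, [], close => ([], [close])
  | f + 1, ch :: rest, close =>
    match closerB ch with
    | some c =>
      let r := innerB f rest c
      if r.2 ≠ [] then (r.1, r.2 ++ [close])
      else innerB f r.1 close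
    | none =>
      if ch = close then (rest, [])
      else innerB f rest close

-- Source B's top-level while loop over expr (the final value of `needs`).
def topB : Nat → List Char → List Char
  | 0, _ => []
  | _ + 1, [] => []
  | f + 1, ch :: rest =>
    match closerB ch with
    | some c =>
      let r := innerB f rest c
      if r.2 ≠ [] then r.2 else topB f r.1
    | none => topB f rest

-- expr.count("'") ported as List.count on the characters (exact for a 1-char needle).
def complete_expression_alt (expr : String) : String :=
  let l := expr.toList
  String.mk (l ++ (if l.count '\'' % 2 = 1 then ['\''] else [])
               ++ (if l.count '"' % 2 = 1 then ['"'] else [])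
               ++ topB (l.length + 1) l)

-- ===== PRECONDITION & SPEC =====
def Spec_complete_expression (expr : String) (out : String) : Prop := out = complete_expression_alt expr
instance (expr : String) (out : String) : Decidable (Spec_complete_expression expr out) := by unfold Spec_complete_expression; infer_instance

-- ===== CLAIM (what is proved, stated in full; the proofs are below) =====
def Claim_equal_complete_expression : Prop := ∀ (expr : String), Dom_complete_expression expr → Spec_complete_expression expr (complete_expression expr)

-- ===== LEMMAS AND PROOFS =====

def isOpen (c : Char) : Bool := c = '(' || c = '[' || c = '{'

def closeOf (c : Char) : Char := if c = '(' then ')' else if c = '[' then ']' else '}'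

-- proof-side one-step stack machine on the stack of EXPECTED closers, top first
def stepT (s : List Char) (ch : Char) : List Char :=
  match closerB ch with
  | some c => c :: s
  | none => if s.head? = some ch then s.tail else s

-- one step of A decomposed, related to one step of stepT on the reversed closeOf-image
theorem step_char (st : List Char) (sq dq : Bool) (res : List Char) (ch : Char)
    (h : ∀ c ∈ st, isOpen c = true) :
    ∃ st', stepA (st, sq, dq, res) ch =
        (st', (if ch = '\'' then !sq else sq), (if ch = '"' then !dq else dq), res ++ [ch]) ∧
      stepT ((st.map closeOf).reverse) ch = (st'.map closeOf).reverse ∧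
      (∀ c ∈ st', isOpen c = true) := by
  have hsub : ∀ c ∈ st.dropLast, isOpen c = true := fun c hc => h c (List.mem_of_mem_dropLast hc)
  by_cases h1 : ch = '('
  · exact ⟨st ++ ['('], by simp [stepA, bmapA, h1], by simp [stepT, closerB, h1, closeOf],
      by intro c hc; rcases List.mem_append.1 hc with hc | hc; exact h c hc; simp_all [isOpen]⟩
  by_cases h2 : ch = '['
  · exact ⟨st ++ ['['], by simp [stepA, bmapA, h2], by simp [stepT, closerB, h2, closeOf],
      by intro c hc; rcases List.mem_append.1 hc with hc | hc; exact h c hc; simp_all [isOpen]⟩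
  by_cases h3 : ch = '{'
  · exact ⟨st ++ ['{'], by simp [stepA, bmapA, h3], by simp [stepT, closerB, h3, closeOf],
      by intro c hc; rcases List.mem_append.1 hc with hc | hc; exact h c hc; simp_all [isOpen]⟩
  -- ch is not an opener: closerB ch = none, bmapA ch = none
  have hbm : bmapA ch = none := by simp [bmapA, h1, h2, h3]
  have hcb : closerB ch = none := by simp [closerB, h1, h2, h3]
  cases hL : st.getLast? with
  | none =>
    have hrev : ((st.map closeOf).reverse).head? = none := by
      simp [List.getLast?_map, hL]
    refine ⟨st, ?_, by simp [stepT, hcb, hrev], h⟩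
    by_cases h4 : ch = ')' ∨ ch = ']' ∨ ch = '}'
    · have hnq : ¬ch = '\'' ∧ ¬ch = '"' := by rcases h4 with h4 | h4 | h4 <;> simp [h4]
      simp [stepA, hbm, h4, hL, hnq.1, hnq.2]
    · simp only [stepA, hbm, Option.isSome_none, Bool.false_eq_true, if_false,
        List.contains_eq_mem, List.mem_cons, List.not_mem_nil, or_false, decide_eq_true_eq, h4]
      by_cases h5 : ch = '\'' <;> by_cases h6 : ch = '"' <;> simp [h5, h6]
  | some t =>
    have ht : isOpen t = true := h t (List.mem_of_getLast? hL)
    have ht' : t = '(' ∨ t = '[' ∨ t = '{' := by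
      simpa [isOpen, or_assoc] using ht
    have htc : bmapA t = some (closeOf t) := by
      rcases ht' with ht' | ht' | ht' <;> simp [bmapA, closeOf, ht']
    have hrev : ((st.map closeOf).reverse).head? = some (closeOf t) := by
      simp [List.getLast?_map, hL]
    have hclo : closeOf t = ')' ∨ closeOf t = ']' ∨ closeOf t = '}' := by
      rcases ht' with ht' | ht' | ht' <;> simp [closeOf, ht']
    by_cases h4 : ch = ')' ∨ ch = ']' ∨ ch = '}'
    · have hnq : ¬ch = '\'' ∧ ¬ch = '"' := by rcases h4 with h4 | h4 | h4 <;> simp [h4]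
      by_cases hpop : closeOf t = ch
      · refine ⟨st.dropLast, ?_, ?_, hsub⟩
        · simp [stepA, hbm, h4, hL, htc, hpop, hnq.1, hnq.2]
        · simp [stepT, hcb, hrev, hpop, List.map_dropLast]
      · refine ⟨st, ?_, by simp [stepT, hcb, hrev, hpop], h⟩
        have hne : ¬ bmapA t = some ch := by rw [htc]; simp [hpop]
        simp [stepA, hbm, h4, hL, hne, hnq.1, hnq.2]
    · have hchne : closeOf t ≠ ch := by
        intro hEq; apply h4
        rcases hclo with hc | hc | hc <;> simp [← hEq, hc]
      refine ⟨st, ?_, by simp [stepT, hcb, hrev, hchne], h⟩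
      simp only [stepA, hbm, Option.isSome_none, Bool.false_eq_true, if_false,
        List.contains_eq_mem, List.mem_cons, List.not_mem_nil, or_false, decide_eq_true_eq, h4, hL]
      by_cases h5 : ch = '\'' <;> by_cases h6 : ch = '"' <;> simp [h5, h6]

theorem toggle_parity (b : Bool) (n : Nat) (ch q : Char) :
    ((if ch = q then !b else b) != decide (n % 2 = 1)) =
      (b != decide ((n + if ch == q then 1 else 0) % 2 = 1)) := by
  by_cases h : ch = q
  · subst h
    have hone : (ch == ch) = true := by simp
    rcases Nat.mod_two_eq_zero_or_one n with hn | hn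
    · have h1 : (n + 1) % 2 = 1 := by omega
      simp only [hone, if_true, h1, hn]
      cases b <;> rfl
    · have h1 : (n + 1) % 2 = 0 := by omega
      simp only [hone, if_true, h1, hn]
      cases b <;> rfl
  · have h' : (ch == q) = false := by simp [h]
    simp [h, h']

-- main loop invariant for A's fold: result chars, quote parities, and the stack
-- tracked through stepT on the reversed closeOf-image
theorem loop_inv (l : List Char) : ∀ (st : List Char) (sq dq : Bool) (res : List Char),
    (∀ c ∈ st, isOpen c = true) →
    (l.foldl stepA (st, sq, dq, res)).2.2.2 = res ++ l ∧
    (l.foldl stepA (st, sq, dq, res)).2.1 = (sq != decide (l.count '\'' % 2 = 1)) ∧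
    (l.foldl stepA (st, sq, dq, res)).2.2.1 = (dq != decide (l.count '"' % 2 = 1)) ∧
    List.foldl stepT ((st.map closeOf).reverse) l
      = (((l.foldl stepA (st, sq, dq, res)).1.map closeOf)).reverse ∧
    (∀ c ∈ (l.foldl stepA (st, sq, dq, res)).1, isOpen c = true) := by
  induction l with
  | nil => intro st sq dq res h; exact ⟨by simp, by simp, by simp, rfl, h⟩
  | cons ch l ih =>
    intro st sq dq res h
    obtain ⟨st', hA, hB, hst'⟩ := step_char st sq dq res ch h
    obtain ⟨ih1, ih2, ih3, ih4, ih5⟩ :=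
      ih st' (if ch = '\'' then !sq else sq) (if ch = '"' then !dq else dq) (res ++ [ch]) hst'
    refine ⟨?_, ?_, ?_, ?_, ?_⟩
    · simp only [List.foldl_cons, hA, ih1, List.append_assoc, List.singleton_append]
    · simp only [List.foldl_cons, hA, ih2, List.count_cons]
      exact toggle_parity sq (l.count '\'') ch '\''
    · simp only [List.foldl_cons, hA, ih3, List.count_cons]
      exact toggle_parity dq (l.count '"') ch '"'
    · simp only [List.foldl_cons, hA, hB, ih4]
    · simpa only [List.foldl_cons, hA] using ih5

theorem drainA_eq_map (st : List Char) (h : ∀ c ∈ st, isOpen c = true) :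
    drainA st = st.map closeOf := by
  induction st with
  | nil => rfl
  | cons c rest ih =>
    have hc := h c List.mem_cons_self
    have hc' : c = '(' ∨ c = '[' ∨ c = '{' := by simpa [isOpen, or_assoc] using hc
    have hbm : bmapA c = some (closeOf c) := by
      rcases hc' with hc' | hc' | hc' <;> simp [bmapA, closeOf, hc']
    simp [drainA, hbm, ih fun c hc => h c (List.mem_cons_of_mem _ hc)]

theorem parity_iff (n : Nat) : (false != decide (n % 2 = 1)) = decide (n % 2 = 1) := by
  cases decide (n % 2 = 1) <;> simp

-- innerB searches for `close`: either it finds it after a consumed block that leaves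
-- any surrounding stack untouched, or it reaches the end owing the listed closers.
theorem innerB_spec (n : Nat) : ∀ (l : List Char) (close : Char) (fuel : Nat),
    l.length ≤ n → l.length < fuel →
    ((innerB fuel l close).2 = [] ∧
      ∃ c0, c0 ≠ [] ∧ l = c0 ++ (innerB fuel l close).1 ∧
        ∀ s, List.foldl stepT (close :: s) c0 = s) ∨
    ((innerB fuel l close).2 ≠ [] ∧
      ∀ s, List.foldl stepT (close :: s) l = (innerB fuel l close).2 ++ s) := by
  induction n using Nat.strong_induction_on with
  | _ n ih =>
    intro l close fuel hn hf
    match l, fuel with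
    | _, 0 => omega
    | [], f + 1 =>
      right
      refine ⟨by simp [innerB], fun s => ?_⟩
      simp [innerB]
    | ch :: rest, f + 1 =>
      have hrestf : rest.length < f := by simp at hf; omega
      have hrestn : rest.length < n := by simp at hn; omega
      cases hc : closerB ch with
      | some c =>
        have hch : ch = '(' ∨ ch = '[' ∨ ch = '{' := by
          by_contra hcon
          rw [not_or, not_or] at hcon
          simp [closerB, hcon.1, hcon.2.1, hcon.2.2] at hc
        have hstep : ∀ s, stepT s ch = c :: s := by intro s; simp [stepT, hc]
        rcases ih rest.length hrestn rest c f le_rfl hrestf with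
          ⟨hr2, c0, hc0, hsplit, hfold⟩ | ⟨hr2, hfold⟩
        · -- matching closer found; Source B continues the loop on the remainder
          have hlen1 : (innerB f rest c).1.length < rest.length := by
            have := congrArg List.length hsplit
            simp at this
            cases c0 with
            | nil => exact absurd rfl hc0
            | cons a t => simp at this; omega
          have hred : innerB (f + 1) (ch :: rest) close = innerB f (innerB f rest c).1 close := by
            simp [innerB, hc, hr2]
          rcases ih (innerB f rest c).1.length (by omega) (innerB f rest c).1 close f le_rfl
              (by omega) with ⟨hs2, c1, hc1, hsplit1, hfold1⟩ | ⟨hs2, hfold1⟩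
          · left
            refine ⟨by rw [hred]; exact hs2, ch :: (c0 ++ c1), by simp, ?_, fun s => ?_⟩
            · rw [hred]
              conv_lhs => rw [hsplit, hsplit1]
              simp
            · simp only [List.foldl_cons, hstep, List.foldl_append]
              rw [hfold (close :: s), hfold1 s]
          · right
            refine ⟨by rw [hred]; exact hs2, fun s => ?_⟩
            rw [hred]
            calc List.foldl stepT (close :: s) (ch :: rest)
                = List.foldl stepT (c :: close :: s) rest := by
                  simp only [List.foldl_cons, hstep]
              _ = List.foldl stepT (close :: s) (innerB f rest c).1 := by
                  conv_lhs => rw [hsplit]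
                  rw [List.foldl_append, hfold (close :: s)]
              _ = (innerB f (innerB f rest c).1 close).2 ++ s := hfold1 s
        · -- the inner group is unmatched: propagate, owing `close` as well
          have hred : innerB (f + 1) (ch :: rest) close
              = ((innerB f rest c).1, (innerB f rest c).2 ++ [close]) := by
            simp [innerB, hc, hr2]
          right
          refine ⟨by rw [hred]; simp, fun s => ?_⟩
          rw [hred]
          calc List.foldl stepT (close :: s) (ch :: rest)
              = List.foldl stepT (c :: close :: s) rest := by
                simp only [List.foldl_cons, hstep]
            _ = (innerB f rest c).2 ++ (close :: s) := hfold (close :: s)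
            _ = ((innerB f rest c).2 ++ [close]) ++ s := by simp
      | none =>
        by_cases heq : ch = close
        · left
          refine ⟨by rw [innerB, hc]; simp [heq], [ch], by simp, by rw [innerB, hc]; simp [heq],
            fun s => ?_⟩
          subst heq
          simp [stepT, hc]
        · have hred : innerB (f + 1) (ch :: rest) close = innerB f rest close := by
            simp [innerB, hc, heq]
          have hstep : ∀ s, stepT (close :: s) ch = close :: s := by
            intro s
            have hne : ¬ close = ch := fun hcon => heq hcon.symm
            simp [stepT, hc, hne]
          rcases ih rest.length hrestn rest close f le_rfl hrestf with
            ⟨hr2, c0, hc0, hsplit, hfold⟩ | ⟨hr2, hfold⟩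
          · left
            exact ⟨by rw [hred]; exact hr2, ch :: c0, by simp, by rw [hred, List.cons_append, ← hsplit],
              fun s => by simp only [List.foldl_cons, hstep]; exact hfold s⟩
          · right
            refine ⟨by rw [hred]; exact hr2, fun s => ?_⟩
            rw [hred]
            simp only [List.foldl_cons, hstep]
            exact hfold s

theorem topB_spec (n : Nat) : ∀ (l : List Char) (fuel : Nat),
    l.length ≤ n → l.length < fuel →
    topB fuel l = List.foldl stepT [] l := by
  induction n using Nat.strong_induction_on with
  | _ n ih =>
    intro l fuel hn hf
    match l, fuel with
    | _, 0 => omega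
    | [], f + 1 => simp [topB]
    | ch :: rest, f + 1 =>
      have hrestf : rest.length < f := by simp at hf; omega
      have hrestn : rest.length < n := by simp at hn; omega
      cases hc : closerB ch with
      | some c =>
        have hstep : stepT [] ch = [c] := by simp [stepT, hc]
        rcases innerB_spec rest.length rest c f le_rfl hrestf with
          ⟨hr2, c0, hc0, hsplit, hfold⟩ | ⟨hr2, hfold⟩
        · have hlen1 : (innerB f rest c).1.length < rest.length := by
            have := congrArg List.length hsplit
            simp at this
            cases c0 with
            | nil => exact absurd rfl hc0
            | cons a t => simp at this; omega
          have hred : topB (f + 1) (ch :: rest) = topB f (innerB f rest c).1 := by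
            rw [topB, hc]; simp [hr2]
          rw [hred, ih (innerB f rest c).1.length (by omega) (innerB f rest c).1 f le_rfl
            (by omega)]
          conv_rhs => rw [List.foldl_cons, hstep, hsplit]
          rw [List.foldl_append, hfold []]
        · have hred : topB (f + 1) (ch :: rest) = (innerB f rest c).2 := by
            rw [topB, hc]; simp [hr2]
          rw [hred, List.foldl_cons, hstep]
          have := hfold []
          simpa using this.symm
      | none =>
        have hstep : stepT [] ch = [] := by simp [stepT, hc]
        have hred : topB (f + 1) (ch :: rest) = topB f rest := by rw [topB, hc]
        rw [hred, List.foldl_cons, hstep, ih rest.length hrestn rest f le_rfl hrestf]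

-- ===== VERDICT (by name: the statement is the Claim_ definition above) =====
theorem complete_expression_spec : Claim_equal_complete_expression := by
  intro expr _
  unfold Spec_complete_expression complete_expression complete_expression_alt
  obtain ⟨h1, h2, h3, h4, h5⟩ :=
    loop_inv expr.toList [] false false [] (by intro c hc; simp at hc)
  have hdrain : drainA (expr.toList.foldl stepA ([], false, false, [])).1.reverse
      = ((expr.toList.foldl stepA ([], false, false, [])).1.map closeOf).reverse := by
    rw [drainA_eq_map _ (by intro c hc; exact h5 c (List.mem_reverse.1 hc)), List.map_reverse]
  have htop : topB (expr.toList.length + 1) expr.toList = List.foldl stepT [] expr.toList :=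
    topB_spec expr.toList.length expr.toList (expr.toList.length + 1) le_rfl (by omega)
  simp only [h1, h2, h3, hdrain, parity_iff, htop]
  rw [show ((([] : List Char).map closeOf).reverse = ([] : List Char)) from rfl] at h4
  rw [h4]
  simp
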